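-- pv_equiv track=rewrite | github.com/nookcoder/Algorithm | python/greed/설탕배달.py | deliver
-- ===== SOURCE A (Python) =====
-- def deliver(n):
--     count = 0
--     while n > 0:
--         if n % 5 == 0:
--             count += n // 5
--             n = 0
--         else:
--             count += 1
--             n -= 3
--
--     if n == 0:
--         return count
--
--     return -1
-- ===== SOURCE B (Python) =====
-- def deliver(n):
--     # closed form: minimal number of 3kg bags is b = (2*n) % 5 (2 is 3's inverse mod 5)
--     b = (2 * n) % 5
--     r = n - 3 * b
--     return r // 5 + b if r >= 0 else -1
-- ===== Notes on version B (the rewrite author's own statement) =====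
-- stated objective: simpler
-- what changed: Replaces the greedy subtract-3-until-divisible-by-5 while-loop with a closed form: b = (2*n) % 5 is the minimal number of 3kg bags (2 is the inverse of 3 mod 5), then r = n - 3*b and the answer is r//5 + b if r >= 0 else -1.
import Mathlib
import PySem

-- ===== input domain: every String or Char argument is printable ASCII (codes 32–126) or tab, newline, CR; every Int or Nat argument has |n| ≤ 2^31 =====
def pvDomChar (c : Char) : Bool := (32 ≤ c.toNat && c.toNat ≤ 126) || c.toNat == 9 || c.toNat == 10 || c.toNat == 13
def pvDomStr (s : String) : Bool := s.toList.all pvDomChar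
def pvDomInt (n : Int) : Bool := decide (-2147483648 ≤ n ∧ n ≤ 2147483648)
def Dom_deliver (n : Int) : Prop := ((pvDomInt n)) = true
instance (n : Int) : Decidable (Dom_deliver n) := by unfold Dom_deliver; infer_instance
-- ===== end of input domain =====

-- B replaces A's greedy while-loop by a closed modular-arithmetic formula; objective: simpler.

-- ===== PORT A =====
-- the while loop of A, state (n, count)
def deliverLoop (n count : Int) : Int × Int :=
  if n > 0 then
    if PySem.Int.mod n 5 = 0 then
      deliverLoop 0 (count + PySem.Int.floordiv n 5)
    else
      deliverLoop (n - 3) (count + 1)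
  else (n, count)
termination_by n.toNat
decreasing_by all_goals omega

def deliver (n : Int) : Int :=
  let p := deliverLoop n 0
  if p.1 = 0 then p.2 else -1

-- ===== PORT B =====
def deliver_alt (n : Int) : Int :=
  let b := PySem.Int.mod (2 * n) 5
  let r := n - 3 * b
  if r ≥ 0 then PySem.Int.floordiv r 5 + b else -1

-- ===== PRECONDITION & SPEC =====
def Spec_deliver (n : Int) (out : Int) : Prop := out = deliver_alt n
instance (n : Int) (out : Int) : Decidable (Spec_deliver n out) := by unfold Spec_deliver; infer_instance

-- ===== CLAIM (what is proved, stated in full; the proofs are below) =====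
def Claim_equal_deliver : Prop := ∀ (n : Int), Dom_deliver n → Spec_deliver n (deliver n)

-- ===== LEMMAS AND PROOFS =====

theorem deliver_alt_emod (n : Int) :
    deliver_alt n =
      (if n - 3 * ((2 * n) % 5) ≥ 0 then (n - 3 * ((2 * n) % 5)) / 5 + (2 * n) % 5
       else -1) := by
  simp [deliver_alt]

-- loop invariant: the final answer built from the loop's exit state is the closed form shifted by count
theorem deliverLoop_spec (n count : Int) :
    (if (deliverLoop n count).1 = 0 then (deliverLoop n count).2 else -1) =
      (if deliver_alt n = -1 then -1 else count + deliver_alt n) := by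
  fun_induction deliverLoop n count with
  | case1 n c hpos hmod ih =>
      rw [ih, deliver_alt_emod, deliver_alt_emod]
      rw [PySem.Int.mod_eq_emod_of_pos (by norm_num : (0:Int) < 5)] at hmod
      rw [PySem.Int.floordiv_eq_ediv_of_pos (by norm_num : (0:Int) < 5)]
      split_ifs <;> omega
  | case2 n c hpos hmod ih =>
      rw [ih, deliver_alt_emod, deliver_alt_emod]
      rw [PySem.Int.mod_eq_emod_of_pos (by norm_num : (0:Int) < 5)] at hmod
      have hc : n % 5 = 1 ∨ n % 5 = 2 ∨ n % 5 = 3 ∨ n % 5 = 4 := by omega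
      have hb : (2 * (n - 3)) % 5 = (2 * n) % 5 - 1 := by
        rcases hc with h | h | h | h <;> omega
      have h2 : n - 3 - 3 * ((2 * n) % 5 - 1) = n - 3 * ((2 * n) % 5) := by ring
      rw [hb, h2]
      split_ifs <;> omega
  | case3 n c hpos =>
      rw [deliver_alt_emod]
      dsimp only
      split_ifs <;> omega

-- ===== VERDICT (by name: the statement is the Claim_ definition above) =====
theorem deliver_spec : Claim_equal_deliver := by
  intro n _
  unfold Spec_deliver deliver
  have h := deliverLoop_spec n 0
  simp only [zero_add] at h
  rw [h]
  split_ifs with h1 <;> omega
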